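-- pv_equiv track=rewrite | github.com/luiseufrasio/codility | python/2010/prefix_set2.py | solution
-- ===== SOURCE A (Python) =====
-- def solution(A):
--     B = {}
--     p = 0
--     n = len(A)
--     for i in range(n):
--         try:
--             B[A[i]] += 1
--         except KeyError:
--             B[A[i]] = 1
--             p = i
--     return p
-- ===== SOURCE B (Python) =====
-- def solution(A):
--     # Reverse scan: the answer is the last index whose value does not occur earlier.
--     for i in range(len(A) - 1, -1, -1):
--         if A[i] not in A[:i]:
--             return i
--     return 0
-- ===== Notes on version B (the rewrite author's own statement) =====
-- stated objective: alternative
-- what changed: Replaces the forward dict-counting pass that tracks the running last first-occurrence index with a dictionary-free backwards linear search that returns the first index (scanning from the end) whose value does not occur in the preceding prefix.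
import Mathlib
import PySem

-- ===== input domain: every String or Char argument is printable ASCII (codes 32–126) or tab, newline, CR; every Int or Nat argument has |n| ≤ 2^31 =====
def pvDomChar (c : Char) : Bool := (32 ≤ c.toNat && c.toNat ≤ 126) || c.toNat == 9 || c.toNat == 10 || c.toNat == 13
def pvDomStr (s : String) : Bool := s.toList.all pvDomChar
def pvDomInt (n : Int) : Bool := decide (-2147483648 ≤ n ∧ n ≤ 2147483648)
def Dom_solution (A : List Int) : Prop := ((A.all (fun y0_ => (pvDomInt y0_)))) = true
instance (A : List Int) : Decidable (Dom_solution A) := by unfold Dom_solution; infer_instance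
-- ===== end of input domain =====

-- B replaces A's forward dict-counting pass with a dictionary-free backwards linear search
-- (first index from the end whose value does not occur earlier); alternative algorithm, not claimed faster.

-- ===== PORT A =====
-- one loop step of A: try B[A[i]] += 1 except KeyError: B[A[i]] = 1; p = i
def solStepA (st : PySem.Dict Int Int × Int) (x : Int) (i : Int) : PySem.Dict Int Int × Int :=
  match st.1.get? x with
  | some c => (st.1.insert x (c + 1), st.2)
  | none   => (st.1.insert x 1, i)

def solution (A : List Int) : Int :=
  let n := PySem.List.len A
  let st := (PySem.List.pyRange 0 n 1).foldl
    (fun st i => solStepA st (PySem.List.pyGetD A i 0) i) (PySem.Dict.empty, 0)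
  st.2

-- ===== PORT B =====
-- for i in range(len(A)-1, -1, -1): if A[i] not in A[:i]: return i;  return 0
def solution_alt (A : List Int) : Int :=
  match (PySem.List.pyRange (PySem.List.len A - 1) (-1) (-1)).find?
      (fun i => !((PySem.List.slice A none (some i)).contains (PySem.List.pyGetD A i 0))) with
  | some i => i
  | none => 0

-- ===== PRECONDITION & SPEC =====
def Spec_solution (A : List Int) (out : Int) : Prop := out = solution_alt A
instance (A : List Int) (out : Int) : Decidable (Spec_solution A out) := by unfold Spec_solution; infer_instance

-- ===== CLAIM (what is proved, stated in full; the proofs are below) =====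
def Claim_equal_solution : Prop := ∀ (A : List Int), Dom_solution A → Spec_solution A (solution A)

-- ===== LEMMAS AND PROOFS =====

-- both branches of A's loop step insert the key, so the dict's key set is the set of seen values
theorem foldA_contains (l : List (Int × Int)) (d : PySem.Dict Int Int) (p : Int) (k : Int) :
    ((l.foldl (fun st q => solStepA st q.2 q.1) (d, p)).1).contains k
      = (d.contains k || (l.map (·.2)).contains k) := by
  induction l generalizing d p with
  | nil => simp
  | cons q t ih =>
      obtain ⟨i, x⟩ := q
      simp only [List.foldl_cons, List.map_cons, List.contains_cons]
      have hstep : ∀ st : PySem.Dict Int Int × Int,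
          ((solStepA st x i).1).contains k = (k == x || st.1.contains k) := by
        intro st
        unfold solStepA
        rcases st.1.get? x with _ | c <;> simp [PySem.Dict.contains_insert]
      rcases hA : solStepA (d, p) x i with ⟨d', p'⟩
      rw [ih d' p']
      have := hstep (d, p)
      rw [hA] at this
      simp only [this]
      cases h1 : (k == x) <;> cases h2 : d.contains k <;> simp

-- A's fold over the enumerated list (index, value)
def foldA (xs : List Int) : PySem.Dict Int Int × Int :=
  (PySem.List.enumerate xs 0).foldl (fun st q => solStepA st q.2 q.1) (PySem.Dict.empty, 0)

theorem solution_eq_foldA (A : List Int) : solution A = (foldA A).2 := by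
  unfold solution foldA
  rw [PySem.List.enumerate_eq_map_pyRange A 0, List.foldl_map]

theorem foldA_snd_append (xs : List Int) (x : Int) :
    (foldA (xs ++ [x])).2 = if x ∈ xs then (foldA xs).2 else (xs.length : Int) := by
  unfold foldA
  rw [PySem.List.enumerate_append, List.foldl_append]
  have henum1 : PySem.List.enumerate [x] ((0 : Int) + xs.length) = [(((xs.length : Int)), x)] := by
    simp [PySem.List.enumerate]
  rw [henum1]
  simp only [List.foldl_cons, List.foldl_nil]
  have hcont : ((PySem.List.enumerate xs 0).foldl (fun st q => solStepA st q.2 q.1)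
      (PySem.Dict.empty, 0)).1.contains x = xs.contains x := by
    have := foldA_contains (PySem.List.enumerate xs 0) PySem.Dict.empty 0 x
    simpa [PySem.List.map_snd_enumerate] using this
  rcases hg : ((PySem.List.enumerate xs 0).foldl (fun st q => solStepA st q.2 q.1)
      (PySem.Dict.empty, 0)).1.get? x with _ | c
  · have hx : x ∉ xs := by
      rw [PySem.Dict.get?_eq_none_iff_contains] at hg
      rw [hcont] at hg
      simpa using hg
    have hstep : solStepA ((PySem.List.enumerate xs 0).foldl (fun st q => solStepA st q.2 q.1)
          (PySem.Dict.empty, 0)) x ((xs.length : Int))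
        = (((PySem.List.enumerate xs 0).foldl (fun st q => solStepA st q.2 q.1)
          (PySem.Dict.empty, 0)).1.insert x 1, ((xs.length : Int))) := by
      rw [solStepA.eq_def, hg]
    rw [hstep]
    simp [hx]
  · have hx : x ∈ xs := by
      have : ((PySem.List.enumerate xs 0).foldl (fun st q => solStepA st q.2 q.1)
          (PySem.Dict.empty, 0)).1.contains x = true := by
        rw [PySem.Dict.contains_eq_isSome_get?, hg]; rfl
      rw [hcont] at this
      simpa using this
    have hstep : solStepA ((PySem.List.enumerate xs 0).foldl (fun st q => solStepA st q.2 q.1)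
          (PySem.Dict.empty, 0)) x ((xs.length : Int))
        = (((PySem.List.enumerate xs 0).foldl (fun st q => solStepA st q.2 q.1)
          (PySem.Dict.empty, 0)).1.insert x (c + 1),
          ((PySem.List.enumerate xs 0).foldl (fun st q => solStepA st q.2 q.1)
          (PySem.Dict.empty, 0)).2) := by
      rw [solStepA.eq_def, hg]
    rw [hstep]
    simp [hx]

-- find? only depends on the predicate's values on members
theorem find?_congr_mem {α : Type} (l : List α) (p q : α → Bool)
    (h : ∀ a ∈ l, p a = q a) : l.find? p = l.find? q := by
  induction l with
  | nil => rfl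
  | cons a t ih =>
      simp only [List.find?_cons]
      rw [h a List.mem_cons_self, ih (fun b hb => h b (List.mem_cons_of_mem a hb))]

theorem solution_alt_nil : solution_alt [] = 0 := by
  unfold solution_alt
  rw [PySem.List.pyRange_neg_one_eq_nil (by simp)]
  rfl

theorem solution_alt_append (xs : List Int) (x : Int) :
    solution_alt (xs ++ [x]) = if x ∈ xs then solution_alt xs else (xs.length : Int) := by
  unfold solution_alt
  have hlen : PySem.List.len (xs ++ [x]) - 1 = (xs.length : Int) := by
    simp [PySem.List.len_eq]
  rw [hlen, PySem.List.pyRange_neg_one_cons (by omega)]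
  have hslice : PySem.List.slice (xs ++ [x]) none (some ((xs.length : Int))) = xs := by
    rw [PySem.List.slice_to_natCast]
    simp
  have hget : PySem.List.pyGetD (xs ++ [x]) ((xs.length : Int)) 0 = x := by
    rw [PySem.List.pyGetD_natCast]
    simp [List.getD]
  by_cases hx : x ∈ xs
  · rw [List.find?_cons_of_neg (by simp [hslice, hget, hx])]
    have hcong : ((PySem.List.pyRange ((xs.length : Int) - 1) (-1) (-1)).find?
        (fun i => !((PySem.List.slice (xs ++ [x]) none (some i)).contains
          (PySem.List.pyGetD (xs ++ [x]) i 0))))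
        = ((PySem.List.pyRange ((xs.length : Int) - 1) (-1) (-1)).find?
        (fun i => !((PySem.List.slice xs none (some i)).contains
          (PySem.List.pyGetD xs i 0)))) := by
      apply find?_congr_mem
      intro i hi
      rw [PySem.List.mem_pyRange_neg_one] at hi
      have h0 : 0 ≤ i := by omega
      lift i to ℕ using h0 with n
      have h1 : n < xs.length := by exact_mod_cast (by omega : (n : Int) < (xs.length : Int))
      have hs : PySem.List.slice (xs ++ [x]) none (some (n : Int))
          = PySem.List.slice xs none (some (n : Int)) := by
        rw [PySem.List.slice_to_natCast, PySem.List.slice_to_natCast]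
        exact List.take_append_of_le_length (by omega)
      have hg : PySem.List.pyGetD (xs ++ [x]) (n : Int) 0 = PySem.List.pyGetD xs (n : Int) 0 := by
        rw [PySem.List.pyGetD_natCast, PySem.List.pyGetD_natCast]
        simp [List.getD, List.getElem?_append_left h1]
      rw [hs, hg]
    rw [hcong]
    have hlen2 : (xs.length : Int) - 1 = PySem.List.len xs - 1 := by
      simp [PySem.List.len_eq]
    rw [hlen2, if_pos hx]
  · rw [List.find?_cons_of_pos (by simp [hslice, hget, hx])]
    simp [hx]

theorem sol_eq (A : List Int) : solution A = solution_alt A := by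
  induction A using List.reverseRecOn with
  | nil =>
      rw [solution_alt_nil, solution_eq_foldA]
      rfl
  | append_singleton xs x ih =>
      rw [solution_eq_foldA, foldA_snd_append, solution_alt_append, ← solution_eq_foldA, ih]

-- ===== VERDICT (by name: the statement is the Claim_ definition above) =====
theorem solution_spec : Claim_equal_solution := by
  intro A _
  exact sol_eq A
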